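-- pv_equiv track=rewrite | github.com/RJScripts-24/DataReaper | backend/src/datareaper/api/routes/v1_contract.py | _threat_type_from_target
-- ===== SOURCE A (Python) =====
-- from typing import Any, TypeVar
--
-- def _threat_type_from_target(target: dict[str, Any], index: int) -> str:
--     data_types = [str(item).lower() for item in target.get("dataTypes", [])]
--     if any("email" in item for item in data_types):
--         return "email"
--     if any("phone" in item for item in data_types):
--         return "phone"
--     if any("location" in item or "address" in item for item in data_types):
--         return "location"
--     return ["email", "phone", "location"][index % 3]
-- ===== SOURCE B (Python) =====
-- def _threat_type_from_target(target, index):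
--     has_email = has_phone = has_location = False
--     for item in target.get("dataTypes", []):
--         s = str(item).lower()
--         if "email" in s:
--             has_email = True
--         if "phone" in s:
--             has_phone = True
--         if "location" in s or "address" in s:
--             has_location = True
--     if has_email:
--         return "email"
--     if has_phone:
--         return "phone"
--     if has_location:
--         return "location"
--     return ["email", "phone", "location"][index % 3]
-- ===== Notes on version B (the rewrite author's own statement) =====
-- stated objective: alternative
-- what changed: Replaced the list comprehension plus three independent any() scans by a single accumulating pass that lowercases each item once and sets three booleans, deciding the priority (email > phone > location) afterwards; the index % 3 fallback is unchanged.
import Mathlib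
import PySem

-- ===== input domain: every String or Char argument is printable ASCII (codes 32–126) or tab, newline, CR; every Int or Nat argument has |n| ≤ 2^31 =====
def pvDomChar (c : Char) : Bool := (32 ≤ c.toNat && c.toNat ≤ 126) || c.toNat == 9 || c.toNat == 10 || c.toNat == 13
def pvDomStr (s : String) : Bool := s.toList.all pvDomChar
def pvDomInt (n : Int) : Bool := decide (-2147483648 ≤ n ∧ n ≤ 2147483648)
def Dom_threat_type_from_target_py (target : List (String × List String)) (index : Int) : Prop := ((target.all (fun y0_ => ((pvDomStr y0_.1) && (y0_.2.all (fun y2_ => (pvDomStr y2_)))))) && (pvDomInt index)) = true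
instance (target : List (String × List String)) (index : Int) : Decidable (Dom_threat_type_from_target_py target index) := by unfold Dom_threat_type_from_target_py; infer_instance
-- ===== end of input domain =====

-- B replaces A's list comprehension plus three independent any() scans by a single
-- accumulating pass over the raw items (one lowercasing per item, three booleans),
-- deciding the email > phone > location priority afterwards; same cost, different structure.

-- ===== PORT A =====
-- target.get("dataTypes", []): first match in the association list, default []
def pvDictGetDataTypes (target : List (String × List String)) : List String :=
  match target.find? (fun p => p.1 == "dataTypes") with
  | some p => p.2
  | none => []

def threat_type_from_target_py (target : List (String × List String)) (index : Int) : String :=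
  let data_types := (pvDictGetDataTypes target).map (fun item => PySem.Str.lower item)
  if data_types.any (fun item => PySem.Str.isIn "email" item) then "email"
  else if data_types.any (fun item => PySem.Str.isIn "phone" item) then "phone"
  else if data_types.any (fun item => PySem.Str.isIn "location" item || PySem.Str.isIn "address" item) then "location"
  else PySem.List.pyGetD ["email", "phone", "location"] (PySem.Int.mod index 3) ""
  -- index % 3 is always in [0, 3), so the list indexing never raises (pyGetD's default is dead)

-- ===== PORT B =====
-- one pass: (has_email, has_phone, has_location) accumulated in a fold
def pvAltStep (st : Bool × Bool × Bool) (item : String) : Bool × Bool × Bool :=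
  let s := PySem.Str.lower item
  ((if PySem.Str.isIn "email" s then true else st.1),
   (if PySem.Str.isIn "phone" s then true else st.2.1),
   (if PySem.Str.isIn "location" s || PySem.Str.isIn "address" s then true else st.2.2))

def pvAltScan (items : List String) : Bool × Bool × Bool :=
  items.foldl pvAltStep (false, false, false)

def threat_type_from_target_py_alt (target : List (String × List String)) (index : Int) : String :=
  let st := pvAltScan (pvDictGetDataTypes target)
  if st.1 then "email"
  else if st.2.1 then "phone"
  else if st.2.2 then "location"
  else PySem.List.pyGetD ["email", "phone", "location"] (PySem.Int.mod index 3) ""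

-- ===== PRECONDITION & SPEC =====
def Spec_threat_type_from_target_py (target : List (String × List String)) (index : Int) (out : String) : Prop := out = threat_type_from_target_py_alt target index
instance (target : List (String × List String)) (index : Int) (out : String) : Decidable (Spec_threat_type_from_target_py target index out) := by unfold Spec_threat_type_from_target_py; infer_instance

-- ===== CLAIM (what is proved, stated in full; the proofs are below) =====
def Claim_equal_threat_type_from_target_py : Prop := ∀ (target : List (String × List String)) (index : Int), Dom_threat_type_from_target_py target index → Spec_threat_type_from_target_py target index (threat_type_from_target_py target index)

-- ===== LEMMAS AND PROOFS =====

-- the fold's invariant: each boolean is its seed OR-ed with the corresponding any-scan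
theorem pvAltScan_foldl (items : List String) (e p l : Bool) :
    items.foldl pvAltStep (e, p, l)
    = (e || items.any (fun it => PySem.Str.isIn "email" (PySem.Str.lower it)),
       p || items.any (fun it => PySem.Str.isIn "phone" (PySem.Str.lower it)),
       l || items.any (fun it => PySem.Str.isIn "location" (PySem.Str.lower it) || PySem.Str.isIn "address" (PySem.Str.lower it))) := by
  induction items generalizing e p l with
  | nil => simp
  | cons x xs ih =>
    simp only [List.foldl_cons, List.any_cons, ih, pvAltStep]
    cases PySem.Str.isIn "email" (PySem.Str.lower x) <;>
      cases PySem.Str.isIn "phone" (PySem.Str.lower x) <;>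
        cases (PySem.Str.isIn "location" (PySem.Str.lower x) || PySem.Str.isIn "address" (PySem.Str.lower x)) <;>
          simp

theorem pvAltScan_eq (items : List String) :
    pvAltScan items
    = (items.any (fun it => PySem.Str.isIn "email" (PySem.Str.lower it)),
       items.any (fun it => PySem.Str.isIn "phone" (PySem.Str.lower it)),
       items.any (fun it => PySem.Str.isIn "location" (PySem.Str.lower it) || PySem.Str.isIn "address" (PySem.Str.lower it))) := by
  rw [pvAltScan, pvAltScan_foldl]
  simp

-- ===== VERDICT (by name: the statement is the Claim_ definition above) =====
theorem threat_type_from_target_py_spec : Claim_equal_threat_type_from_target_py := by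
  intro target index _
  unfold Spec_threat_type_from_target_py threat_type_from_target_py threat_type_from_target_py_alt
  simp [pvAltScan_eq, List.any_map, Function.comp]
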